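-- pv_equiv track=rewrite | github.com/DDMAL/HHP-EventsEditor | framework/filter.py | searchPRP
-- ===== SOURCE A (Python) =====
-- def searchPRP(PRP, PRPList):
-- 	pair = PRPList[0]
-- 	if PRP == pair[0]:
-- 		return pair
-- 	elif len(PRPList) == 1:
-- 		return ['','']
-- 	else:
-- 		return searchPRP(PRP,PRPList[1:])
-- ===== SOURCE B (Python) =====
-- def searchPRP(PRP, PRPList):
--     i = 0
--     while True:
--         pair = PRPList[i]
--         if PRP == pair[0]:
--             return pair
--         i += 1
--         if i == len(PRPList):
--             return ['', '']
-- ===== Notes on version B (the rewrite author's own statement) =====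
-- stated objective: simpler
-- what changed: Replaces slice-building recursion (PRPList[1:] copied at every step) with an explicit index-based while loop over the original list.
import Mathlib
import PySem

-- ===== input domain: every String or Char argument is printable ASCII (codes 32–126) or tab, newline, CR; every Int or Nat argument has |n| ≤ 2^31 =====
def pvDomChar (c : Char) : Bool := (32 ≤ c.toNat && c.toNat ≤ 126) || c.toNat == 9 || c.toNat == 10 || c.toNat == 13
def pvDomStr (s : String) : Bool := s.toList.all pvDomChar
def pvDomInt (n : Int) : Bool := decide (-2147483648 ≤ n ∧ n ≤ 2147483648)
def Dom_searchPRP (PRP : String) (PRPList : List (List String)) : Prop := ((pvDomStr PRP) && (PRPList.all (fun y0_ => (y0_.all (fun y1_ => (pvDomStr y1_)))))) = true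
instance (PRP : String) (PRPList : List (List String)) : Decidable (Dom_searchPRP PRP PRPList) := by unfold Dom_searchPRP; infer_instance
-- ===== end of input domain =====

-- B replaces A's slice-building recursion with an explicit index-based while loop over the
-- original list (no per-step copies); same return value, same raising inputs.

-- ===== PORT A =====
-- A: pair = PRPList[0]; if PRP == pair[0]: return pair; elif len == 1: return ['','']; else recurse on PRPList[1:].
-- PRPList[0] / pair[0] on an empty list is an IndexError; the port returns [] there (outside Pre_).
def searchPRP (PRP : String) (PRPList : List (List String)) : List String :=
  match PRPList with
  | [] => []                                  -- PRPList[0]: IndexError, excluded by Pre_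
  | pair :: rest =>
    match PySem.List.pyGet? pair 0 with
    | none => []                              -- pair[0]: IndexError, excluded by Pre_
    | some h =>
      if PRP = h then pair
      else if rest = [] then ["", ""]         -- len(PRPList) == 1
      else searchPRP PRP rest                 -- PRPList[1:] of a nonempty list = its tail

-- ===== PORT B =====
-- B: index loop; pair = PRPList[i]; match → return pair; i += 1; i == len → return ['',''].
def searchPRPLoop (PRP : String) (PRPList : List (List String)) (i : Nat) : List String :=
  match hg : PySem.List.pyGet? PRPList (i : Int) with  -- hg is used by the termination proof
  | none => []                                -- PRPList[i]: IndexError (only reachable for empty list, outside Pre_)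
  | some pair =>
    match PySem.List.pyGet? pair 0 with
    | none => []                              -- pair[0]: IndexError, excluded by Pre_
    | some h =>
      if PRP = h then pair
      else if i + 1 = PRPList.length then ["", ""]
      else searchPRPLoop PRP PRPList (i + 1)
termination_by PRPList.length - i
decreasing_by
  have hi : i < PRPList.length := by
    by_contra hle
    rw [PySem.List.pyGet?, PySem.List.pyIdx?] at hg
    simp at hg
    split at hg <;> simp_all
  omega

def searchPRP_alt (PRP : String) (PRPList : List (List String)) : List String :=
  searchPRPLoop PRP PRPList 0

-- ===== PRECONDITION & SPEC =====
-- Pre_ admits exactly the inputs where the Python A returns: the list is nonempty and every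
-- empty pair is preceded by a matching pair (so the scan stops before reading its [0]).
def Pre_searchPRP (PRP : String) (PRPList : List (List String)) : Prop :=
  PRPList ≠ [] ∧ ∀ i < PRPList.length, PRPList.getD i [] = [] →
    ∃ j < i, (PRPList.getD j []).head? = some PRP
instance (PRP : String) (PRPList : List (List String)) : Decidable (Pre_searchPRP PRP PRPList) := by
  unfold Pre_searchPRP; infer_instance
def pvWitness_searchPRP : String × List (List String) := ("a", [["b", "c"], ["a", "d"]])
def Spec_searchPRP (PRP : String) (PRPList : List (List String)) (out : List String) : Prop := out = searchPRP_alt PRP PRPList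
instance (PRP : String) (PRPList : List (List String)) (out : List String) : Decidable (Spec_searchPRP PRP PRPList out) := by unfold Spec_searchPRP; infer_instance

-- ===== CLAIM (what is proved, stated in full; the proofs are below) =====
def Claim_equal_searchPRP : Prop := ∀ (PRP : String) (PRPList : List (List String)), Dom_searchPRP PRP PRPList → Pre_searchPRP PRP PRPList → Spec_searchPRP PRP PRPList (searchPRP PRP PRPList)

-- ===== LEMMAS AND PROOFS =====

-- shifting the loop index by one steps the list (the loop never looks left of i)
theorem searchPRPLoop_cons (PRP : String) (p : List String) (rest : List (List String)) (i : Nat) :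
    searchPRPLoop PRP (p :: rest) (i + 1) = searchPRPLoop PRP rest i := by
  induction hn : rest.length - i using Nat.strong_induction_on generalizing i with
  | _ n ih =>
    subst hn
    conv_lhs => rw [searchPRPLoop]
    conv_rhs => rw [searchPRPLoop]
    rw [show (((i + 1 : Nat)) : Int) = ((i : Nat) : Int) + 1 from by push_cast; ring,
        PySem.List.pyGet?_cons_succ]
    split
    · rfl
    · rename_i pair hgL
      split
      · rfl
      · rename_i h hgR
        have hi : i < rest.length := by
          rw [PySem.List.pyGet?_natCast] at hgL
          exact (List.getElem?_eq_some_iff.mp hgL).1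
        by_cases hm : PRP = h
        · simp [hm]
        · simp only [if_neg hm, List.length_cons]
          by_cases hlen : i + 1 = rest.length
          · simp [hlen]
          · rw [if_neg (by omega), if_neg hlen]
            exact ih (rest.length - (i + 1)) (by omega) (i + 1) rfl

-- the two ports agree on every input (both return [] exactly where the Pythons raise)
theorem searchPRP_eq_loop (PRP : String) (PRPList : List (List String)) :
    searchPRP PRP PRPList = searchPRPLoop PRP PRPList 0 := by
  induction PRPList with
  | nil =>
    rw [searchPRP]
    conv_rhs => rw [searchPRPLoop]
    split
    · rfl
    · rename_i pair hg; simp [PySem.List.pyGet?_zero] at hg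
  | cons pair rest ih =>
    have hstep : searchPRPLoop PRP (pair :: rest) 0 =
        (match PySem.List.pyGet? pair 0 with
         | none => []
         | some h =>
           if PRP = h then pair
           else if 0 + 1 = (pair :: rest).length then ["", ""]
           else searchPRPLoop PRP (pair :: rest) (0 + 1)) := by
      conv_lhs => rw [searchPRPLoop]
      split
      · rename_i hg; simp at hg
      · rename_i pair' hg; simp at hg; subst hg; rfl
    rw [hstep, searchPRP]
    cases hp0 : PySem.List.pyGet? pair 0 with
    | none => rfl
    | some h =>
      simp only
      by_cases hm : PRP = h
      · simp [hm]
      · simp only [if_neg hm, List.length_cons]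
        by_cases hr : rest = []
        · subst hr; simp
        · rw [if_neg hr,
              if_neg (show ¬ (0 + 1 = rest.length + 1) from fun hc =>
                hr (List.length_eq_zero_iff.mp (by omega))),
              searchPRPLoop_cons]
          exact ih

-- ===== VERDICT (by name: the statement is the Claim_ definition above) =====
theorem searchPRP_spec : Claim_equal_searchPRP := by
  intro PRP L _ _
  unfold Spec_searchPRP searchPRP_alt
  exact searchPRP_eq_loop PRP L
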